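-- pv_equiv track=rewrite | github.com/FlameDavid92/Python-ProgettazioneDiAlgoritmi | BFS.py | calcolaNCamminiMinimi
-- ===== SOURCE A (Python) =====
-- import collections
--
-- def calcolaNCamminiMinimi(G, u):
--     DIST = [-1 for _ in G]
--     M = [0 for _ in G]
--     DIST[u] = 0
--     M[u] = 1
--     Q = collections.deque()
--     Q.append(u)
--     while len(Q) != 0:
--         v = Q.popleft()
--         for adjacent in G[v]:
--             if DIST[adjacent] == -1:
--                 DIST[adjacent] = DIST[v]+1
--                 M[adjacent] = M[v]
--                 Q.append(adjacent)
--             elif DIST[adjacent] == DIST[v]+1: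
--                 M[adjacent] = M[adjacent]+M[v]
--     return M
-- ===== SOURCE B (Python) =====
-- import collections
--
-- def calcolaNCamminiMinimi(G, u):
--     # Phase 1: plain BFS to compute distances and discovery order.
--     DIST = [-1] * len(G)
--     DIST[u] = 0
--     order = []
--     Q = collections.deque([u])
--     while Q:
--         v = Q.popleft()
--         order.append(v)
--         for w in G[v]:
--             if DIST[w] == -1:
--                 DIST[w] = DIST[v] + 1
--                 Q.append(w)
--     # Phase 2: DP over vertices in non-decreasing distance order.
--     M = [0] * len(G)
--     M[u] = 1
--     for v in order:
--         for w in G[v]: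
--             if DIST[w] == DIST[v] + 1:
--                 M[w] += M[v]
--     return M
-- ===== Notes on version B (the rewrite author's own statement) =====
-- stated objective: alternative
-- what changed: A interleaves path-counting into the BFS loop; B first runs a plain BFS that only computes distances and the discovery order, then does a separate level-ordered DP pass (M[w] += M[v] over edges that advance a level) to count the shortest paths.
import Mathlib
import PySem

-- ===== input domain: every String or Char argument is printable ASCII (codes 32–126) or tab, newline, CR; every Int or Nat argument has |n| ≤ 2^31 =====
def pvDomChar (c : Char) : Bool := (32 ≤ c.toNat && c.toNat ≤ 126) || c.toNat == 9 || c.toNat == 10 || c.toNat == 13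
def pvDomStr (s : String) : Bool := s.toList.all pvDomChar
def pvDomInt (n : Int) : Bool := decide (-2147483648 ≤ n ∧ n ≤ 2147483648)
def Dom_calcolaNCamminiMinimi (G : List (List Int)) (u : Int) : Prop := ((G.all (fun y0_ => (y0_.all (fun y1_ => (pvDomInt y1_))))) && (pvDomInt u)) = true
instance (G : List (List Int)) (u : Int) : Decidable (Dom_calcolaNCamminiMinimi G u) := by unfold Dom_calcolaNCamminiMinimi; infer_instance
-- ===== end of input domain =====

-- B changes the decomposition: A counts shortest paths inside the BFS loop; B runs a plain BFS
-- (distances + discovery order) and then a separate level-ordered DP pass.  Objective: alternative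
-- (same O(V+E) cost).  Equality is proved on Pre_ (valid source and adjacency entries).

-- ===== PORT A =====
-- one iteration of A's inner `for adjacent in G[v]` loop; state = (DIST, M, Q)
def aStep (v : Int) (st : List Int × List Int × List Int) (w : Int) : List Int × List Int × List Int :=
  match PySem.List.pyGet? st.1 w, PySem.List.pyGet? st.1 v with
  | some dw, some dv =>
    if dw = -1 then
      (PySem.List.pySetD st.1 w (dv + 1),
       PySem.List.pySetD st.2.1 w (PySem.List.pyGetD st.2.1 v 0),
       st.2.2 ++ [w])
    else if dw = dv + 1 then
      (st.1,
       PySem.List.pySetD st.2.1 w (PySem.List.pyGetD st.2.1 w 0 + PySem.List.pyGetD st.2.1 v 0),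
       st.2.2)
    else st
  | _, _ => st

-- A's `while len(Q) != 0` loop; fuel only makes the recursion structural (len(G)+1 pops
-- always suffice on Pre_: every append discovers a fresh vertex)
def aLoop (G : List (List Int)) : Nat → List Int → List Int → List Int → List Int
  | 0, _, M, _ => M
  | _ + 1, _, M, [] => M
  | fuel + 1, D, M, v :: Q =>
    let s := ((PySem.List.pyGet? G v).getD []).foldl (aStep v) (D, M, Q)
    aLoop G fuel s.1 s.2.1 s.2.2

def calcolaNCamminiMinimi (G : List (List Int)) (u : Int) : List Int :=
  let D := PySem.List.pySetD (G.map fun _ => (-1 : Int)) u 0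
  let M := PySem.List.pySetD (G.map fun _ => (0 : Int)) u 1
  aLoop G (G.length + 1) D M [u]

-- ===== PORT B =====
-- phase 1, inner loop step: state = (DIST, Q); only distances and the queue evolve
def bStep (v : Int) (st : List Int × List Int) (w : Int) : List Int × List Int :=
  match PySem.List.pyGet? st.1 w, PySem.List.pyGet? st.1 v with
  | some dw, some dv =>
    if dw = -1 then (PySem.List.pySetD st.1 w (dv + 1), st.2 ++ [w]) else st
  | _, _ => st

-- phase 1: BFS returning (final DIST, discovery order); same fuel convention as aLoop
def bLoop (G : List (List Int)) : Nat → List Int → List Int → List Int → List Int × List Int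
  | 0, D, ord, _ => (D, ord)
  | _ + 1, D, ord, [] => (D, ord)
  | fuel + 1, D, ord, v :: Q =>
    let s := ((PySem.List.pyGet? G v).getD []).foldl (bStep v) (D, Q)
    bLoop G fuel s.1 (ord ++ [v]) s.2

-- phase 2, innermost step: M[w] += M[v] when the edge v→w advances one level
def repStep (Df : List Int) (v : Int) (M : List Int) (w : Int) : List Int :=
  match PySem.List.pyGet? Df w, PySem.List.pyGet? Df v with
  | some fw, some fv =>
    if fw = fv + 1 then
      PySem.List.pySetD M w (PySem.List.pyGetD M w 0 + PySem.List.pyGetD M v 0)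
    else M
  | _, _ => M

def repRow (G : List (List Int)) (Df : List Int) (v : Int) (M : List Int) : List Int :=
  ((PySem.List.pyGet? G v).getD []).foldl (repStep Df v) M

def repAll (G : List (List Int)) (Df : List Int) (M : List Int) (ord : List Int) : List Int :=
  ord.foldl (fun M v => repRow G Df v M) M

def calcolaNCamminiMinimi_alt (G : List (List Int)) (u : Int) : List Int :=
  let D := PySem.List.pySetD (G.map fun _ => (-1 : Int)) u 0
  let r := bLoop G (G.length + 1) D [] [u]
  let M := PySem.List.pySetD (G.map fun _ => (0 : Int)) u 1
  repAll G r.1 M r.2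

-- ===== PRECONDITION & SPEC =====
-- helpers for Pre_: Python index normalisation and the reachable-vertex set of the BFS,
-- written as the n-step closure of the one-step neighbour map (a Finset fixed point,
-- not a re-run of the ports' loops)
def pvPos (n : Nat) (i : Int) : Nat := (if i < 0 then i + n else i).toNat
def pvNbrs (G : List (List Int)) (v : Nat) : Finset Nat :=
  ((G.getD v []).filterMap
    (fun a => if PySem.Raise.InRange G.length a then some (pvPos G.length a) else none)).toFinset
def pvStepSet (G : List (List Int)) (S : Finset Nat) : Finset Nat := S ∪ S.biUnion (pvNbrs G)
def pvReach (G : List (List Int)) (u : Nat) : Finset Nat := (pvStepSet G)^[G.length] {u}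

-- Pre_ is exactly the domain on which the Python A returns: the source u is a valid Python
-- index of G, and every adjacency entry of every vertex reachable from u is a valid Python
-- index (on a reachable invalid entry Python raises IndexError).
def Pre_calcolaNCamminiMinimi (G : List (List Int)) (u : Int) : Prop :=
  PySem.Raise.InRange G.length u ∧
  ∀ v ∈ pvReach G (pvPos G.length u), ∀ a ∈ G.getD v [], PySem.Raise.InRange G.length a
instance (G : List (List Int)) (u : Int) : Decidable (Pre_calcolaNCamminiMinimi G u) := by
  unfold Pre_calcolaNCamminiMinimi; infer_instance

def pvWitness_calcolaNCamminiMinimi : List (List Int) × Int := ([[1, 2], [2], [0]], 0)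

def Spec_calcolaNCamminiMinimi (G : List (List Int)) (u : Int) (out : List Int) : Prop := out = calcolaNCamminiMinimi_alt G u
instance (G : List (List Int)) (u : Int) (out : List Int) : Decidable (Spec_calcolaNCamminiMinimi G u out) := by unfold Spec_calcolaNCamminiMinimi; infer_instance

-- ===== CLAIM (what is proved, stated in full; the proofs are below) =====
def Claim_equal_calcolaNCamminiMinimi : Prop := ∀ (G : List (List Int)) (u : Int), Dom_calcolaNCamminiMinimi G u → Pre_calcolaNCamminiMinimi G u → Spec_calcolaNCamminiMinimi G u (calcolaNCamminiMinimi G u)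

-- ===== LEMMAS AND PROOFS =====

-- bridge lemmas: the PySem indexing primitives on an in-range index act at position pvPos
lemma pvPos_lt (n : Nat) (i : Int) (h : PySem.Raise.InRange n i) : pvPos n i < n := by
  unfold PySem.Raise.InRange at h
  unfold pvPos
  split <;> omega

lemma pyGet?_pos {α : Type} (xs : List α) (i : Int) (h : PySem.Raise.InRange xs.length i) :
    PySem.List.pyGet? xs i = xs[pvPos xs.length i]? := by
  unfold PySem.Raise.InRange at h
  simp only [PySem.List.pyGet?, PySem.List.pyIdx?, pvPos]
  by_cases h1 : i < 0
  · rw [if_pos h1, if_neg (by omega : ¬ (0:Int) ≤ i), if_pos (by omega : -(xs.length:Int) ≤ i)]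
    simp only [Option.bind]
    congr 1
    omega
  · rw [if_neg h1, if_pos (by omega : (0:Int) ≤ i), if_pos (by omega : i < (xs.length:Int))]
    simp only [Option.bind]

lemma pyGet?_inRange {α : Type} (xs : List α) (i : Int) (x : α)
    (h : PySem.List.pyGet? xs i = some x) : PySem.Raise.InRange xs.length i := by
  by_contra hc
  rw [(PySem.List.pyGet?_eq_none_iff xs i).2 hc] at h
  simp at h

lemma pySetD_pos {α : Type} (xs : List α) (i : Int) (v : α) (h : PySem.Raise.InRange xs.length i) :
    PySem.List.pySetD xs i v = xs.set (pvPos xs.length i) v := by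
  unfold PySem.Raise.InRange at h
  simp only [PySem.List.pySetD, PySem.List.pySet?, PySem.List.pyIdx?, pvPos]
  by_cases h1 : i < 0
  · rw [if_pos h1, if_neg (by omega : ¬ (0:Int) ≤ i), if_pos (by omega : -(xs.length:Int) ≤ i)]
    simp only [Option.map_some, Option.getD_some]
    congr 1
    omega
  · rw [if_neg h1, if_pos (by omega : (0:Int) ≤ i), if_pos (by omega : i < (xs.length:Int))]
    simp only [Option.map_some, Option.getD_some]

lemma pyGetD_pos {α : Type} (xs : List α) (i : Int) (d : α) (h : PySem.Raise.InRange xs.length i) :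
    PySem.List.pyGetD xs i d = xs.getD (pvPos xs.length i) d := by
  unfold PySem.Raise.InRange at h
  simp only [PySem.List.pyGetD, PySem.List.pyGet?, PySem.List.pyIdx?, pvPos, List.getD]
  by_cases h1 : i < 0
  · rw [if_pos h1, if_neg (by omega : ¬ (0:Int) ≤ i), if_pos (by omega : -(xs.length:Int) ≤ i)]
    simp only [Option.bind]
    congr 2
    omega
  · rw [if_neg h1, if_pos (by omega : (0:Int) ≤ i), if_pos (by omega : i < (xs.length:Int))]
    simp only [Option.bind]

lemma pvPos_congr {m n : Nat} (i : Int) (h : m = n) : pvPos m i = pvPos n i := by rw [h]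

-- the reachable set is a fixed point of the one-step closure
lemma pvStepSet_subset (G : List (List Int)) (S : Finset Nat) : S ⊆ pvStepSet G S :=
  Finset.subset_union_left

lemma iterate_subset (G : List (List Int)) (S : Finset Nat) : ∀ k, S ⊆ (pvStepSet G)^[k] S := by
  intro k
  induction k with
  | zero => simp
  | succ k ih =>
    rw [Function.iterate_succ_apply']
    exact ih.trans (pvStepSet_subset G _)

lemma pvNbrs_subset_range (G : List (List Int)) (v : Nat) :
    pvNbrs G v ⊆ Finset.range G.length := by
  intro x hx
  simp only [pvNbrs, List.mem_toFinset, List.mem_filterMap] at hx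
  obtain ⟨a, _, ha⟩ := hx
  split at ha
  · rename_i hr
    rw [Finset.mem_range, ← Option.some.inj ha]
    exact pvPos_lt _ _ hr
  · simp at ha

lemma pvStepSet_subset_range (G : List (List Int)) (S : Finset Nat)
    (h : S ⊆ Finset.range G.length) : pvStepSet G S ⊆ Finset.range G.length := by
  unfold pvStepSet
  intro x hx
  rcases Finset.mem_union.1 hx with hx | hx
  · exact h hx
  · obtain ⟨v, _, hv⟩ := Finset.mem_biUnion.1 hx
    exact pvNbrs_subset_range G v hv

lemma iterate_subset_range (G : List (List Int)) (u : Nat) (hu : u < G.length) :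
    ∀ k, (pvStepSet G)^[k] {u} ⊆ Finset.range G.length := by
  intro k
  induction k with
  | zero => simpa using Finset.singleton_subset_iff.2 (Finset.mem_range.2 hu)
  | succ k ih =>
    rw [Function.iterate_succ_apply']
    exact pvStepSet_subset_range G _ ih

lemma grow_or_fixed (G : List (List Int)) (u : Nat) :
    ∀ k, pvStepSet G ((pvStepSet G)^[k] {u}) = (pvStepSet G)^[k] {u} ∨
      k + 2 ≤ ((pvStepSet G)^[k + 1] {u}).card := by
  intro k
  induction k with
  | zero =>
    by_cases h : pvStepSet G ((pvStepSet G)^[0] {u}) = (pvStepSet G)^[0] {u}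
    · exact Or.inl h
    · right
      have hss : ({u} : Finset Nat) ⊂ pvStepSet G {u} :=
        ⟨pvStepSet_subset G _, fun hsub => h (le_antisymm hsub (pvStepSet_subset G _))⟩
      have := Finset.card_lt_card hss
      simpa using this
  | succ k ih =>
    by_cases h : pvStepSet G ((pvStepSet G)^[k + 1] {u}) = (pvStepSet G)^[k + 1] {u}
    · exact Or.inl h
    · right
      have hss : (pvStepSet G)^[k + 1] {u} ⊂ pvStepSet G ((pvStepSet G)^[k + 1] {u}) :=
        ⟨pvStepSet_subset G _, fun hsub => h (le_antisymm hsub (pvStepSet_subset G _))⟩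
      have hcard := Finset.card_lt_card hss
      rw [← Function.iterate_succ_apply' (pvStepSet G) (k + 1)] at hcard
      rcases ih with hfix | hge
      · exfalso
        apply h
        rw [Function.iterate_succ_apply', hfix, hfix]
      · simp only [Nat.succ_eq_add_one] at hcard hge ⊢
        omega

lemma pvReach_fixed (G : List (List Int)) (u : Nat) (hu : u < G.length) :
    pvStepSet G (pvReach G u) = pvReach G u := by
  unfold pvReach
  rcases grow_or_fixed G u G.length with h | h
  · exact h
  · exfalso
    have hsub := iterate_subset_range G u hu (G.length + 1)
    have := Finset.card_le_card hsub
    rw [Finset.card_range] at this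
    omega

lemma pvReach_mem_self (G : List (List Int)) (u : Nat) : u ∈ pvReach G u :=
  iterate_subset G {u} G.length (Finset.mem_singleton_self u)

lemma pvReach_closed (G : List (List Int)) (u : Nat) (hu : u < G.length)
    (v : Nat) (hv : v ∈ pvReach G u) (a : Int) (ha : a ∈ G.getD v [])
    (hr : PySem.Raise.InRange G.length a) : pvPos G.length a ∈ pvReach G u := by
  rw [← pvReach_fixed G u hu]
  unfold pvStepSet
  apply Finset.mem_union_right
  apply Finset.mem_biUnion.2 ⟨v, hv, ?_⟩
  simp only [pvNbrs, List.mem_toFinset, List.mem_filterMap]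
  exact ⟨a, ha, by rw [if_pos hr]⟩

-- DIST-length preservation and monotonicity of the phase-1 fold
lemma bfold_length (v : Int) (row : List Int) : ∀ (D Q : List Int),
    ((row.foldl (bStep v) (D, Q)).1).length = D.length := by
  induction row with
  | nil => intro D Q; rfl
  | cons w rest ih =>
    intro D Q
    show ((rest.foldl (bStep v) (bStep v (D, Q) w)).1).length = D.length
    have : (bStep v (D, Q) w).1.length = D.length := by
      unfold bStep
      cases h1 : PySem.List.pyGet? D w <;> cases h2 : PySem.List.pyGet? D v <;> simp
      split <;> simp [PySem.List.length_pySetD]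
    calc ((rest.foldl (bStep v) (bStep v (D, Q) w)).1).length
        = (bStep v (D, Q) w).1.length := by
          have := ih (bStep v (D, Q) w).1 (bStep v (D, Q) w).2
          simpa using this
      _ = D.length := this

lemma bfold_preserve (v : Int) (row : List Int) : ∀ (D Q : List Int) (k : Nat) (d : Int),
    D[k]? = some d → d ≠ -1 → ((row.foldl (bStep v) (D, Q)).1)[k]? = some d := by
  induction row with
  | nil => intro D Q k d hk _; simpa using hk
  | cons w rest ih =>
    intro D Q k d hk hd
    have h1 : (bStep v (D, Q) w).1[k]? = some d := by
      unfold bStep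
      cases hgw : PySem.List.pyGet? D w with
      | none => simpa using hk
      | some dw =>
        cases hgv : PySem.List.pyGet? D v with
        | none => simpa using hk
        | some dv =>
          by_cases h1 : dw = -1
          · subst h1
            have hwIR := pyGet?_inRange D w _ hgw
            rw [pyGet?_pos D w hwIR] at hgw
            have hne : pvPos D.length w ≠ k := by
              intro h; rw [h, hk] at hgw; exact hd (Option.some.inj hgw)
            simp [pySetD_pos D w (dv + 1) hwIR, List.getElem?_set_ne hne, hk]
          · simpa [h1] using hk
    have h2 : rest.foldl (bStep v) (bStep v (D, Q) w) =
        rest.foldl (bStep v) ((bStep v (D, Q) w).1, (bStep v (D, Q) w).2) := by simp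
    simpa [List.foldl_cons, h2] using
      ih (bStep v (D, Q) w).1 (bStep v (D, Q) w).2 k d h1 hd

lemma bloop_preserve (G : List (List Int)) :
    ∀ (fuel : Nat) (D ord Q : List Int) (k : Nat) (d : Int),
    D[k]? = some d → d ≠ -1 → ((bLoop G fuel D ord Q).1)[k]? = some d := by
  intro fuel
  induction fuel with
  | zero => intro D ord Q k d hk _; simpa [bLoop] using hk
  | succ n ih =>
    intro D ord Q k d hk hd
    cases Q with
    | nil => simpa [bLoop] using hk
    | cons v Q' =>
      show ((bLoop G n _ _ _).1)[k]? = some d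
      apply ih _ _ _ k d _ hd
      exact bfold_preserve v _ D Q' k d hk hd

-- the order accumulator of bLoop is a plain append accumulator
lemma bloop_acc (G : List (List Int)) : ∀ (fuel : Nat) (D ord Q : List Int),
    bLoop G fuel D ord Q = ((bLoop G fuel D [] Q).1, ord ++ (bLoop G fuel D [] Q).2) := by
  intro fuel
  induction fuel with
  | zero => intro D ord Q; simp [bLoop]
  | succ n ih =>
    intro D ord Q
    cases Q with
    | nil => simp [bLoop]
    | cons v Q' =>
      show bLoop G n _ (ord ++ [v]) _ = _
      rw [ih _ (ord ++ [v]) _]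
      conv_rhs => rw [show bLoop G (n+1) D [] (v :: Q') = bLoop G n (List.foldl (bStep v) (D, Q') ((PySem.List.pyGet? G v).getD [])).1 ([] ++ [v]) (List.foldl (bStep v) (D, Q') ((PySem.List.pyGet? G v).getD [])).2 from rfl, ih _ ([] ++ [v]) _]
      simp

lemma bloop_length (G : List (List Int)) : ∀ (fuel : Nat) (D ord Q : List Int),
    ((bLoop G fuel D ord Q).1).length = D.length := by
  intro fuel
  induction fuel with
  | zero => intro D ord Q; rfl
  | succ n ih =>
    intro D ord Q
    cases Q with
    | nil => rfl
    | cons v Q' =>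
      show ((bLoop G n _ _ _).1).length = D.length
      rw [ih]
      exact bfold_length v _ D Q'

-- one row: A's fold = (B's phase-1 fold on (DIST,Q), phase-2 fold on M), plus invariants
lemma row_sim (v : Int) : ∀ (row D M Q Df : List Int)
    (hlM : M.length = D.length)
    (hDfL : Df.length = D.length)
    (hrow : ∀ a ∈ row, PySem.Raise.InRange D.length a)
    (hvIR : PySem.Raise.InRange D.length v)
    (hdv : ∀ d : Int, D[pvPos D.length v]? = some d → 0 ≤ d)
    (hge : ∀ d ∈ D, -1 ≤ d)
    (hDM : ∀ k : Nat, D[k]? = some (-1) → M[k]? = some 0)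
    (hDf : ∀ (k : Nat) (d : Int), ((row.foldl (bStep v) (D, Q)).1)[k]? = some d → d ≠ -1 → Df[k]? = some d),
    row.foldl (aStep v) (D, M, Q)
      = ((row.foldl (bStep v) (D, Q)).1, row.foldl (repStep Df v) M,
         (row.foldl (bStep v) (D, Q)).2)
    ∧ (∀ d ∈ (row.foldl (bStep v) (D, Q)).1, -1 ≤ d)
    ∧ (∀ k : Nat, ((row.foldl (bStep v) (D, Q)).1)[k]? = some (-1) →
        (row.foldl (repStep Df v) M)[k]? = some 0)
    ∧ (row.foldl (repStep Df v) M).length = D.length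
    ∧ (∀ q ∈ (row.foldl (bStep v) (D, Q)).2,
        q ∈ Q ∨ (q ∈ row ∧
          ∀ d : Int, ((row.foldl (bStep v) (D, Q)).1)[pvPos D.length q]? = some d → 0 ≤ d)) := by
  intro row
  induction row with
  | nil =>
    intro D M Q Df hlM hDfL hrow hvIR hdv hge hDM hDf
    refine ⟨rfl, hge, ?_, hlM, ?_⟩
    · intro k hk
      exact hDM k hk
    · intro q hq; exact Or.inl hq
  | cons w rest ih =>
    intro D M Q Df hlM hDfL hrow hvIR hdv hge hDM hDf
    have hwIR : PySem.Raise.InRange D.length w := hrow w List.mem_cons_self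
    have hwlt : pvPos D.length w < D.length := pvPos_lt _ _ hwIR
    have hvlt : pvPos D.length v < D.length := pvPos_lt _ _ hvIR
    have hdw : D[pvPos D.length w]? = some D[pvPos D.length w] := List.getElem?_eq_getElem hwlt
    have hdvE : D[pvPos D.length v]? = some D[pvPos D.length v] := List.getElem?_eq_getElem hvlt
    set dw := D[pvPos D.length w] with hdwdef
    set dv := D[pvPos D.length v] with hdvdef
    have hgw : PySem.List.pyGet? D w = some dw := by
      rw [pyGet?_pos D w hwIR]; exact hdw
    have hgv : PySem.List.pyGet? D v = some dv := by
      rw [pyGet?_pos D v hvIR]; exact hdvE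
    have hdv0 : 0 ≤ dv := hdv dv hdvE
    have hvIRf : PySem.Raise.InRange Df.length v := by rw [hDfL]; exact hvIR
    have hwIRf : PySem.Raise.InRange Df.length w := by rw [hDfL]; exact hwIR
    have hposfv : pvPos Df.length v = pvPos D.length v := pvPos_congr v hDfL
    have hposfw : pvPos Df.length w = pvPos D.length w := pvPos_congr w hDfL
    have hgvF : PySem.List.pyGet? Df v = some dv := by
      rw [pyGet?_pos Df v hvIRf, hposfv]
      exact hDf (pvPos D.length v) dv
        (bfold_preserve v (w :: rest) D Q (pvPos D.length v) dv hdvE (by omega)) (by omega)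
    have hwIRM : PySem.Raise.InRange M.length w := by rw [hlM]; exact hwIR
    have hposMw : pvPos M.length w = pvPos D.length w := pvPos_congr w hlM
    have hrow' : ∀ a ∈ rest, PySem.Raise.InRange D.length a :=
      fun a ha => hrow a (List.mem_cons_of_mem _ ha)
    by_cases h1 : dw = -1
    · -- discovery branch
      have hne : pvPos D.length w ≠ pvPos D.length v := by
        intro h
        have h' : D[pvPos D.length w]? = D[pvPos D.length v]? := by rw [h]
        rw [hdw, hdvE] at h'
        have := Option.some.inj h'
        omega
      have hb : bStep v (D, Q) w =
          (D.set (pvPos D.length w) (dv + 1), Q ++ [w]) := by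
        simp [bStep, hgw, hgv, h1, pySetD_pos D w (dv + 1) hwIR]
      have hmv0 : PySem.List.pyGetD M w 0 = 0 := by
        rw [pyGetD_pos M w 0 hwIRM, hposMw]
        have := hDM (pvPos D.length w) (by rw [hdw, h1])
        simp [List.getD, this]
      have ha : aStep v (D, M, Q) w =
          (D.set (pvPos D.length w) (dv + 1),
           M.set (pvPos D.length w) (PySem.List.pyGetD M v 0), Q ++ [w]) := by
        simp [aStep, hgw, hgv, h1, pySetD_pos D w (dv + 1) hwIR,
          pySetD_pos M w _ hwIRM, hposMw]
      -- Df value at w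
      have hD1w : (D.set (pvPos D.length w) (dv + 1))[pvPos D.length w]? = some (dv + 1) := by
        simp [List.getElem?_set_self, hwlt]
      have hrestw : ((rest.foldl (bStep v) (D.set (pvPos D.length w) (dv + 1), Q ++ [w])).1)[pvPos D.length w]? = some (dv + 1) :=
        bfold_preserve v rest _ _ (pvPos D.length w) (dv + 1) hD1w (by omega)
      have hrowfold : (w :: rest).foldl (bStep v) (D, Q) =
          rest.foldl (bStep v) (D.set (pvPos D.length w) (dv + 1), Q ++ [w]) := by
        rw [List.foldl_cons, hb]
      have hDfw : PySem.List.pyGet? Df w = some (dv + 1) := by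
        rw [pyGet?_pos Df w hwIRf, hposfw]
        exact hDf (pvPos D.length w) (dv + 1) (by rw [hrowfold]; exact hrestw) (by omega)
      have hrep : repStep Df v M w = M.set (pvPos D.length w) (PySem.List.pyGetD M v 0) := by
        simp [repStep, hDfw, hgvF, hmv0, pySetD_pos M w _ hwIRM, hposMw]
      -- IH hypotheses at the new state
      set D1 := D.set (pvPos D.length w) (dv + 1) with hD1def
      have hlD1 : D1.length = D.length := by simp [hD1def]
      set M1 := M.set (pvPos D.length w) (PySem.List.pyGetD M v 0) with hM1def
      have hposD1 : ∀ i : Int, pvPos D1.length i = pvPos D.length i :=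
        fun i => pvPos_congr i hlD1
      have hlM1 : M1.length = D1.length := by simp [hM1def, hD1def, hlM]
      have hrow1 : ∀ a ∈ rest, PySem.Raise.InRange D1.length a := by
        rw [hlD1]; exact hrow'
      have hdv1 : ∀ d : Int, D1[pvPos D1.length v]? = some d → 0 ≤ d := by
        intro d hd
        rw [hposD1, hD1def, List.getElem?_set_ne hne] at hd
        exact hdv d hd
      have hge1 : ∀ d ∈ D1, -1 ≤ d := by
        intro d hd
        rcases List.mem_or_eq_of_mem_set hd with h | h
        · exact hge d h
        · omega
      have hDM1 : ∀ k : Nat, D1[k]? = some (-1) → M1[k]? = some 0 := by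
        intro k hk
        have hkne : pvPos D.length w ≠ k := by
          intro h; rw [← h] at hk; rw [hD1w] at hk
          have := Option.some.inj hk; omega
        rw [hD1def, List.getElem?_set_ne hkne] at hk
        rw [hM1def, List.getElem?_set_ne hkne]
        exact hDM k hk
      have hDf1 : ∀ (k : Nat) (d : Int),
          ((rest.foldl (bStep v) (D1, Q ++ [w])).1)[k]? = some d → d ≠ -1 →
          Df[k]? = some d := by
        intro k d h hd; exact hDf k d (by rw [hrowfold]; exact h) hd
      obtain ⟨ih1, ih2, ih3, ih4, ih5⟩ :=
        ih D1 M1 (Q ++ [w]) Df hlM1 (by rw [hDfL, hlD1]) hrow1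
          (by rw [hlD1]; exact hvIR) hdv1 hge1 hDM1 hDf1
      refine ⟨?_, ?_, ?_, ?_, ?_⟩
      · rw [List.foldl_cons, List.foldl_cons, List.foldl_cons, ha, hb, hrep]
        exact ih1
      · rw [hrowfold]; exact ih2
      · rw [hrowfold, List.foldl_cons, hrep]; exact ih3
      · rw [List.foldl_cons, hrep]
        rw [← hlD1]; exact ih4
      · rw [hrowfold]
        intro q hq
        rcases ih5 q hq with h | h
        · rcases List.mem_append.1 h with h' | h'
          · exact Or.inl h'
          · have hqw : q = w := by simpa using h'
            subst hqw
            refine Or.inr ⟨List.mem_cons_self, ?_⟩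
            intro d hd
            rw [hrestw] at hd
            have := Option.some.inj hd; omega
        · refine Or.inr ⟨List.mem_cons_of_mem _ h.1, ?_⟩
          intro d hd
          rw [← hposD1 q] at hd
          exact h.2 d hd
    · -- dw ≠ -1 : DIST and Q are unchanged in both A and B
      have hb : bStep v (D, Q) w = (D, Q) := by
        simp [bStep, hgw, hgv, h1]
      have hDfw : PySem.List.pyGet? Df w = some dw := by
        rw [pyGet?_pos Df w hwIRf, hposfw]
        exact hDf (pvPos D.length w) dw
          (bfold_preserve v (w :: rest) D Q (pvPos D.length w) dw hdw h1) h1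
      have hrowfold : (w :: rest).foldl (bStep v) (D, Q) = rest.foldl (bStep v) (D, Q) := by
        rw [List.foldl_cons, hb]
      by_cases h2 : dw = dv + 1
      · -- cross edge one level down: M[w] += M[v] in both
        have ha : aStep v (D, M, Q) w =
            (D, M.set (pvPos D.length w)
              (PySem.List.pyGetD M w 0 + PySem.List.pyGetD M v 0), Q) := by
          simp [aStep, hgw, hgv, h1, h2, pySetD_pos M w _ hwIRM, hposMw]
          omega
        have hrep : repStep Df v M w =
            M.set (pvPos D.length w)
              (PySem.List.pyGetD M w 0 + PySem.List.pyGetD M v 0) := by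
          simp [repStep, hDfw, hgvF, h2, pySetD_pos M w _ hwIRM, hposMw]
        set M2 := M.set (pvPos D.length w)
          (PySem.List.pyGetD M w 0 + PySem.List.pyGetD M v 0) with hM2def
        have hDM2 : ∀ k : Nat, D[k]? = some (-1) → M2[k]? = some 0 := by
          intro k hk
          have hkne : pvPos D.length w ≠ k := by
            intro h; rw [← h, hdw] at hk
            have := Option.some.inj hk; omega
          rw [hM2def, List.getElem?_set_ne hkne]
          exact hDM k hk
        have hDf2 : ∀ (k : Nat) (d : Int),
            ((rest.foldl (bStep v) (D, Q)).1)[k]? = some d → d ≠ -1 → Df[k]? = some d := by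
          intro k d h hd; exact hDf k d (by rw [hrowfold]; exact h) hd
        obtain ⟨ih1, ih2, ih3, ih4, ih5⟩ :=
          ih D M2 Q Df (by simp [hM2def, hlM]) hDfL hrow' hvIR hdv hge hDM2 hDf2
        refine ⟨?_, ?_, ?_, ?_, ?_⟩
        · rw [List.foldl_cons, List.foldl_cons, List.foldl_cons, ha, hb, hrep]
          exact ih1
        · rw [hrowfold]; exact ih2
        · rw [hrowfold, List.foldl_cons, hrep]; exact ih3
        · rw [List.foldl_cons, hrep]; exact ih4
        · rw [hrowfold]
          intro q hq
          rcases ih5 q hq with h | h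
          · exact Or.inl h
          · exact Or.inr ⟨List.mem_cons_of_mem _ h.1, h.2⟩
      · -- no update in A, B or the replay
        have ha : aStep v (D, M, Q) w = (D, M, Q) := by
          simp [aStep, hgw, hgv, h1, h2]
        have hrep : repStep Df v M w = M := by
          simp [repStep, hDfw, hgvF, h2]
        have hDf3 : ∀ (k : Nat) (d : Int),
            ((rest.foldl (bStep v) (D, Q)).1)[k]? = some d → d ≠ -1 → Df[k]? = some d := by
          intro k d h hd; exact hDf k d (by rw [hrowfold]; exact h) hd
        obtain ⟨ih1, ih2, ih3, ih4, ih5⟩ :=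
          ih D M Q Df hlM hDfL hrow' hvIR hdv hge hDM hDf3
        refine ⟨?_, ?_, ?_, ?_, ?_⟩
        · rw [List.foldl_cons, List.foldl_cons, List.foldl_cons, ha, hb, hrep]
          exact ih1
        · rw [hrowfold]; exact ih2
        · rw [hrowfold, List.foldl_cons, hrep]; exact ih3
        · rw [List.foldl_cons, hrep]; exact ih4
        · rw [hrowfold]
          intro q hq
          rcases ih5 q hq with h | h
          · exact Or.inl h
          · exact Or.inr ⟨List.mem_cons_of_mem _ h.1, h.2⟩

-- the main simulation: A's loop = phase 2 replayed over phase 1's output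
lemma main_sim (G : List (List Int)) (R : Finset Nat)
    (hROK : ∀ v ∈ R, ∀ a ∈ G.getD v [], PySem.Raise.InRange G.length a)
    (hRcl : ∀ v ∈ R, ∀ a ∈ G.getD v [], PySem.Raise.InRange G.length a →
      pvPos G.length a ∈ R) :
    ∀ (fuel : Nat) (D M Q : List Int)
    (hlD : D.length = G.length) (hlM : M.length = D.length)
    (hQ : ∀ q ∈ Q, PySem.Raise.InRange G.length q ∧ pvPos G.length q ∈ R ∧
      ∀ d : Int, D[pvPos G.length q]? = some d → 0 ≤ d)
    (hge : ∀ d ∈ D, -1 ≤ d)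
    (hDM : ∀ k : Nat, D[k]? = some (-1) → M[k]? = some 0),
    aLoop G fuel D M Q = repAll G ((bLoop G fuel D [] Q).1) M ((bLoop G fuel D [] Q).2) := by
  intro fuel
  induction fuel with
  | zero => intro D M Q _ _ _ _ _; simp [aLoop, bLoop, repAll]
  | succ n ih =>
    intro D M Q hlD hlM hQ hge hDM
    cases Q with
    | nil => simp [aLoop, bLoop, repAll]
    | cons v Q' =>
      obtain ⟨hvIR, hvR, hdvG⟩ := hQ v List.mem_cons_self
      have hvlt : pvPos G.length v < G.length := pvPos_lt _ _ hvIR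
      have hgv : PySem.List.pyGet? G v = some G[pvPos G.length v] := by
        rw [pyGet?_pos G v hvIR]
        exact List.getElem?_eq_getElem hvlt
      set row := G[pvPos G.length v] with hrowdef
      have hrowgetD : G.getD (pvPos G.length v) [] = row := List.getD_eq_getElem _ _ hvlt
      have hposD : ∀ i : Int, pvPos D.length i = pvPos G.length i :=
        fun i => pvPos_congr i hlD
      have hrow : ∀ a ∈ row, PySem.Raise.InRange D.length a := by
        intro a ha
        rw [hlD]
        exact hROK _ hvR a (by rw [hrowgetD]; exact ha)
      have hDf : ∀ (k : Nat) (d : Int),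
          ((row.foldl (bStep v) (D, Q')).1)[k]? = some d → d ≠ -1 →
          ((bLoop G n (row.foldl (bStep v) (D, Q')).1 [] (row.foldl (bStep v) (D, Q')).2).1)[k]? = some d :=
        fun k d h hd => bloop_preserve G n _ _ _ k d h hd
      have hDfL : ((bLoop G n (row.foldl (bStep v) (D, Q')).1 [] (row.foldl (bStep v) (D, Q')).2).1).length = D.length := by
        rw [bloop_length]
        exact bfold_length v row D Q'
      obtain ⟨e1, e2, e3, e4, e5⟩ :=
        row_sim v row D M Q' _ hlM hDfL hrow (by rw [hlD]; exact hvIR)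
          (by rw [hposD]; exact hdvG) hge hDM hDf
      have hstepA : aLoop G (n + 1) D M (v :: Q') =
          aLoop G n ((row.foldl (aStep v) (D, M, Q')).1)
            ((row.foldl (aStep v) (D, M, Q')).2.1) ((row.foldl (aStep v) (D, M, Q')).2.2) := by
        simp [aLoop, hgv]
      have hstepB : bLoop G (n + 1) D [] (v :: Q') =
          bLoop G n ((row.foldl (bStep v) (D, Q')).1) ([] ++ [v]) ((row.foldl (bStep v) (D, Q')).2) := by
        simp [bLoop, hgv]
      set B := row.foldl (bStep v) (D, Q') with hBdef
      set M₁ := row.foldl (repStep ((bLoop G n B.1 [] B.2).1) v) M with hM1def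
      have hlB : B.1.length = D.length := bfold_length v row D Q'
      have hposB : ∀ i : Int, pvPos B.1.length i = pvPos G.length i :=
        fun i => pvPos_congr i (by rw [hlB, hlD])
      -- invariants at the next state
      have hQ1 : ∀ q ∈ B.2, PySem.Raise.InRange G.length q ∧ pvPos G.length q ∈ R ∧
          ∀ d : Int, B.1[pvPos G.length q]? = some d → 0 ≤ d := by
        intro q hq
        rcases e5 q hq with h | h
        · obtain ⟨hqIR, hqR, hqd⟩ := hQ q (List.mem_cons_of_mem _ h)
          have hqlt : pvPos G.length q < D.length := by rw [hlD]; exact pvPos_lt _ _ hqIR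
          have hqE : D[pvPos G.length q]? = some D[pvPos G.length q] := List.getElem?_eq_getElem hqlt
          have hd0 : 0 ≤ D[pvPos G.length q] := hqd _ hqE
          have hpres : B.1[pvPos G.length q]? = some D[pvPos G.length q] :=
            bfold_preserve v row D Q' (pvPos G.length q) _ hqE (by omega)
          refine ⟨hqIR, hqR, ?_⟩
          intro d hd; rw [hpres] at hd; have := Option.some.inj hd; omega
        · have hqIR : PySem.Raise.InRange G.length q := by
            rw [← hlD]; exact hrow q h.1
          refine ⟨hqIR, ?_, ?_⟩
          · exact hRcl _ hvR q (by rw [hrowgetD]; exact h.1) hqIR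
          · intro d hd
            exact h.2 d (by rw [hposD]; exact hd)
      have := ih B.1 M₁ B.2 (by rw [hlB, hlD]) (by rw [e4, hlB]) hQ1 e2 e3
      rw [hstepA, e1]
      simp only []
      rw [this, hstepB, bloop_acc G n B.1 ([] ++ [v]) B.2]
      have hrep : repRow G ((bLoop G n B.1 [] B.2).1) v M = M₁ := by
        simp [repRow, hgv, hM1def]
      simp [repAll, hrep]

-- ===== VERDICT (by name: the statement is the Claim_ definition above) =====
theorem calcolaNCamminiMinimi_spec : Claim_equal_calcolaNCamminiMinimi := by
  intro G u _ hPre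
  obtain ⟨huIR, hOK⟩ := hPre
  have hult : pvPos G.length u < G.length := pvPos_lt _ _ huIR
  unfold Spec_calcolaNCamminiMinimi calcolaNCamminiMinimi calcolaNCamminiMinimi_alt
  simp only []
  have hlmap : (G.map fun _ => (-1 : Int)).length = G.length := by simp
  have huIR' : PySem.Raise.InRange (G.map fun _ => (-1 : Int)).length u := by
    rw [hlmap]; exact huIR
  have huIR'' : PySem.Raise.InRange (G.map fun _ => (0 : Int)).length u := by
    simp only [List.length_map]; exact huIR
  have hD0 : PySem.List.pySetD (G.map fun _ => (-1 : Int)) u 0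
      = (G.map fun _ => (-1 : Int)).set (pvPos G.length u) 0 := by
    rw [pySetD_pos _ u 0 huIR', pvPos_congr u hlmap]
  have hM0 : PySem.List.pySetD (G.map fun _ => (0 : Int)) u 1
      = (G.map fun _ => (0 : Int)).set (pvPos G.length u) 1 := by
    have hlmap0 : (G.map fun _ => (0 : Int)).length = G.length := by simp
    rw [pySetD_pos _ u 1 huIR'', pvPos_congr u hlmap0]
  set D0 := PySem.List.pySetD (G.map fun _ => (-1 : Int)) u 0 with hD0def
  set M0 := PySem.List.pySetD (G.map fun _ => (0 : Int)) u 1 with hM0def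
  have hlD : D0.length = G.length := by rw [hD0]; simp
  have hlM : M0.length = D0.length := by rw [hD0, hM0]; simp
  have hD0u : D0[pvPos G.length u]? = some 0 := by
    rw [hD0]; exact List.getElem?_set_self (by simpa using hult)
  have hQ : ∀ q ∈ [u], PySem.Raise.InRange G.length q ∧
      pvPos G.length q ∈ pvReach G (pvPos G.length u) ∧
      ∀ d : Int, D0[pvPos G.length q]? = some d → 0 ≤ d := by
    intro q hq
    have hqu : q = u := by simpa using hq
    subst hqu
    refine ⟨huIR, pvReach_mem_self G _, ?_⟩
    intro d hd; rw [hD0u] at hd; have := Option.some.inj hd; omega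
  have hge : ∀ d ∈ D0, -1 ≤ d := by
    rw [hD0]
    intro d hd
    rcases List.mem_or_eq_of_mem_set hd with h | h
    · rcases List.mem_map.1 h with ⟨_, _, h'⟩; omega
    · omega
  have hDM : ∀ k : Nat, D0[k]? = some (-1) → M0[k]? = some 0 := by
    intro k hk
    have hkne : pvPos G.length u ≠ k := by
      intro h; rw [← h, hD0u] at hk; have := Option.some.inj hk; omega
    rw [hD0, List.getElem?_set_ne hkne] at hk
    have hklt : k < G.length := by
      by_contra h
      rw [List.getElem?_eq_none (by simpa using Nat.le_of_not_lt h)] at hk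
      simp at hk
    rw [hM0, List.getElem?_set_ne hkne]
    simp [List.getElem?_replicate, hklt]
  exact main_sim G (pvReach G (pvPos G.length u)) hOK
    (fun v hv a ha hr => pvReach_closed G _ hult v hv a ha hr)
    (G.length + 1) D0 M0 [u] hlD hlM hQ hge hDM
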